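-- pv_equiv track=rewrite | github.com/DacianGoina/ICS-copy | src/main/matching_utils.py | two_way_matching
-- ===== SOURCE A (Python) =====
-- def two_way_matching(m1_res_labels, m2_res_labels, m1_types, m2_types):
--     '''
--     Two way matching (intersection) between the labels predicted by 2 distinct classification methods.
--     :param m1_res_labels: predicted labels provided by the first method; built-in list
--     :param m2_res_labels: predicted labels provided by the second method; built-in list
--     :param m1_types: label values meaning for labels from the first list: tuple with 2 values, first value refers to normal label,
--     second value refers to anomalous label
--     :param m2_types: label values meaning for labels from the second list: tuple with 2 values, same meaning as above
--     :return: tuple with 3 numeric values: no. of matches for normal instances, no. of matches for anomalous instances, and wrong matches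
--     '''
--     m1_normal_label, m1_anomalous_label = m1_types
--     m2_normal_label, m2_anomalous_label = m2_types
--
--     normal_instances_matches = 0
--     anomalous_instances_matches = 0
--     wrong_matches = 0
--     for l1_label, l2_label in zip(m1_res_labels, m2_res_labels):
--         if l1_label == m1_normal_label and l2_label == m2_normal_label:
--             normal_instances_matches += 1
--         elif l1_label == m1_anomalous_label and l2_label == m2_anomalous_label:
--             anomalous_instances_matches += 1
--         else:
--             wrong_matches +=1
--
--     return (normal_instances_matches, anomalous_instances_matches, wrong_matches)
-- ===== SOURCE B (Python) =====
-- def two_way_matching(m1_res_labels, m2_res_labels, m1_types, m2_types):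
--     counts = {}
--     for pair in zip(m1_res_labels, m2_res_labels):
--         counts[pair] = counts.get(pair, 0) + 1
--     normal = counts.get((m1_types[0], m2_types[0]), 0)
--     anomalous = counts.get((m1_types[1], m2_types[1]), 0)
--     n = min(len(m1_res_labels), len(m2_res_labels))
--     return (normal, anomalous, n - normal - anomalous)
-- ===== Notes on version B (the rewrite author's own statement) =====
-- stated objective: alternative
-- what changed: Replaced the branchy accumulating loop by a frequency table: build one dict counting each (l1,l2) pair, then read off the normal and anomalous counts by key lookup and derive wrong matches as min(len,len) minus those two counts. Pre_ excludes degenerate label schemes where the normal key pair equals the anomalous key pair and that pair occurs among the predictions: there A's elif order arbitrarily credits doubly-matching pairs to normal only, while the lookup-based B counts them in both buckets.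
-- outside the precondition, e.g. on two_way_matching([0], [0], (0, 0), (0, 0)): A returns (1, 0, 0), B returns (1, 1, -1)
import Mathlib
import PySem

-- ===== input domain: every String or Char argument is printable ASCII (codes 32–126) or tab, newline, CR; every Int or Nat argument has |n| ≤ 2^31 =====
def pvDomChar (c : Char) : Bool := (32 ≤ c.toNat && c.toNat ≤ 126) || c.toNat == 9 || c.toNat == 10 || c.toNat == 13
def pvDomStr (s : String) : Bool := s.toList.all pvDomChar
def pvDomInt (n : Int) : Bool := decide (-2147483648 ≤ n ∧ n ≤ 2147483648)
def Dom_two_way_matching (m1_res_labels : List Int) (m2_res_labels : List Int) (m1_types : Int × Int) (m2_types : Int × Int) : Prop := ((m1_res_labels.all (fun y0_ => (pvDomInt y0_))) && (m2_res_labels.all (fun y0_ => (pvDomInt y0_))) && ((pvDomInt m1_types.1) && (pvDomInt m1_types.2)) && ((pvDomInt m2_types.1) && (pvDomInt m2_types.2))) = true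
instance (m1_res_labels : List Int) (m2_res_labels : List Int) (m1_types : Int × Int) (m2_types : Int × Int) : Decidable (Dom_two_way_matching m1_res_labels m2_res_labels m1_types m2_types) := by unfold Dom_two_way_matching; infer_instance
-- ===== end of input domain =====

-- B builds a frequency table of the zipped label pairs and reads the three counts off it (objective: alternative).


-- ===== PORT A =====
-- Port of A: one fold over the zipped pairs with a triple accumulator, branches in A's order.
def two_way_matching (m1_res_labels : List Int) (m2_res_labels : List Int) (m1_types : Int × Int) (m2_types : Int × Int) : Int × Int × Int :=
  (m1_res_labels.zip m2_res_labels).foldl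
    (fun (acc : Int × Int × Int) p =>
      if p.1 == m1_types.1 && p.2 == m2_types.1 then (acc.1 + 1, acc.2.1, acc.2.2)
      else if p.1 == m1_types.2 && p.2 == m2_types.2 then (acc.1, acc.2.1 + 1, acc.2.2)
      else (acc.1, acc.2.1, acc.2.2 + 1))
    (0, 0, 0)

-- ===== PORT B =====
-- Port of B: a counting dict over the zipped pairs, then two lookups and a closed-form complement.
def two_way_matching_alt (m1_res_labels : List Int) (m2_res_labels : List Int) (m1_types : Int × Int) (m2_types : Int × Int) : Int × Int × Int :=
  let counts := (m1_res_labels.zip m2_res_labels).foldl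
    (fun (d : PySem.Dict (Int × Int) Int) p => d.insert p (d.getD p 0 + 1)) PySem.Dict.empty
  let normal := counts.getD (m1_types.1, m2_types.1) 0
  let anomalous := counts.getD (m1_types.2, m2_types.2) 0
  let n : Int := min m1_res_labels.length m2_res_labels.length
  (normal, anomalous, n - normal - anomalous)

-- ===== PRECONDITION & SPEC =====
-- Pre_ excludes only the degenerate label schemes where the normal key pair equals the anomalous key
-- pair AND that pair occurs among the zipped predictions: there A's elif order arbitrarily credits
-- doubly-matching pairs to normal only, a corner no caller of this matching utility specifies.
def Pre_two_way_matching (m1_res_labels : List Int) (m2_res_labels : List Int) (m1_types : Int × Int) (m2_types : Int × Int) : Prop :=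
  ¬ ((m1_types.1, m2_types.1) = (m1_types.2, m2_types.2) ∧
     (m1_types.1, m2_types.1) ∈ m1_res_labels.zip m2_res_labels)
instance (m1_res_labels : List Int) (m2_res_labels : List Int) (m1_types : Int × Int) (m2_types : Int × Int) : Decidable (Pre_two_way_matching m1_res_labels m2_res_labels m1_types m2_types) := by unfold Pre_two_way_matching; infer_instance

def pvWitness_two_way_matching : List Int × List Int × (Int × Int) × (Int × Int) := ([1, 0, 1], [1, 1, 0], (0, 1), (0, 1))

def Spec_two_way_matching (m1_res_labels : List Int) (m2_res_labels : List Int) (m1_types : Int × Int) (m2_types : Int × Int) (out : Int × Int × Int) : Prop := out = two_way_matching_alt m1_res_labels m2_res_labels m1_types m2_types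
instance (m1_res_labels : List Int) (m2_res_labels : List Int) (m1_types : Int × Int) (m2_types : Int × Int) (out : Int × Int × Int) : Decidable (Spec_two_way_matching m1_res_labels m2_res_labels m1_types m2_types out) := by unfold Spec_two_way_matching; infer_instance

-- ===== CLAIM (what is proved, stated in full; the proofs are below) =====
def Claim_equal_two_way_matching : Prop := ∀ (m1_res_labels : List Int) (m2_res_labels : List Int) (m1_types : Int × Int) (m2_types : Int × Int), Dom_two_way_matching m1_res_labels m2_res_labels m1_types m2_types → Pre_two_way_matching m1_res_labels m2_res_labels m1_types m2_types → Spec_two_way_matching m1_res_labels m2_res_labels m1_types m2_types (two_way_matching m1_res_labels m2_res_labels m1_types m2_types)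

-- ===== LEMMAS AND PROOFS =====

-- A's fold adds the two branch counts and the leftover to any starting accumulator.
theorem foldA_eq (t1 t2 : Int × Int) (xs : List (Int × Int)) (a b c : Int) :
    xs.foldl
      (fun (acc : Int × Int × Int) p =>
        if p.1 == t1.1 && p.2 == t2.1 then (acc.1 + 1, acc.2.1, acc.2.2)
        else if p.1 == t1.2 && p.2 == t2.2 then (acc.1, acc.2.1 + 1, acc.2.2)
        else (acc.1, acc.2.1, acc.2.2 + 1))
      (a, b, c)
    = (a + xs.count (t1.1, t2.1),
       b + xs.countP (fun p => (p.1 == t1.2 && p.2 == t2.2) && !(p.1 == t1.1 && p.2 == t2.1)),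
       c + ((xs.length : Int)
            - xs.count (t1.1, t2.1)
            - xs.countP (fun p => (p.1 == t1.2 && p.2 == t2.2) && !(p.1 == t1.1 && p.2 == t2.1)))) := by
  induction xs generalizing a b c with
  | nil => simp
  | cons hd tl ih =>
    simp only [List.foldl_cons, List.countP_cons, List.count_cons, List.length_cons]
    by_cases h1 : (hd.1 == t1.1 && hd.2 == t2.1) = true
    · rw [if_pos h1, ih]
      have hhd : (hd == (t1.1, t2.1)) = true := by
        cases hd; simp_all [Prod.ext_iff]
      simp [h1, hhd, Prod.ext_iff]
      omega
    · by_cases h2 : (hd.1 == t1.2 && hd.2 == t2.2) = true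
      · rw [if_neg h1, if_pos h2, ih]
        have hhd : (hd == (t1.1, t2.1)) = false := by
          cases hd; simp_all [Prod.ext_iff]
        simp [h1, h2, hhd, Prod.ext_iff]
        omega
      · rw [if_neg h1, if_neg h2, ih]
        have hhd : (hd == (t1.1, t2.1)) = false := by
          cases hd; simp_all [Prod.ext_iff]
        simp [h1, h2, hhd, Prod.ext_iff]
        omega

-- B's counting-dict lookup is the multiset count of the key among the pairs.
theorem countsD_eq (xs : List (Int × Int)) (k : Int × Int) :
    (xs.foldl (fun (d : PySem.Dict (Int × Int) Int) p => d.insert p (d.getD p 0 + 1))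
        PySem.Dict.empty).getD k 0 = xs.count k := by
  rw [PySem.Dict.getD_foldl_insert_add_one]
  simp

-- Under Pre_, A's guarded anomalous count is the plain count of the anomalous key pair.
theorem countP_guard_eq (t1 t2 : Int × Int) (xs : List (Int × Int))
    (hpre : ¬ ((t1.1, t2.1) = (t1.2, t2.2) ∧ (t1.1, t2.1) ∈ xs)) :
    xs.countP (fun p => (p.1 == t1.2 && p.2 == t2.2) && !(p.1 == t1.1 && p.2 == t2.1))
      = xs.count (t1.2, t2.2) := by
  by_cases hk : (t1.1, t2.1) = (t1.2, t2.2)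
  · have hmem : (t1.2, t2.2) ∉ xs := by rw [← hk]; exact fun h => hpre ⟨hk, h⟩
    rw [List.count_eq_zero.mpr hmem, List.countP_eq_zero.mpr]
    rintro ⟨x, y⟩ hp hpred
    simp only [Bool.and_eq_true, beq_iff_eq] at hpred
    obtain ⟨⟨h1, h2⟩, _⟩ := hpred
    exact hmem (h1 ▸ h2 ▸ hp)
  · have hk' : ¬ (t1.1 = t1.2 ∧ t2.1 = t2.2) := by
      intro h; exact hk (by simp [h.1, h.2])
    rw [List.count_eq_countP]
    refine List.countP_congr ?_
    rintro ⟨x, y⟩ _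
    simp [Prod.ext_iff]
    omega

-- ===== VERDICT (by name: the statement is the Claim_ definition above) =====
theorem two_way_matching_spec : Claim_equal_two_way_matching := by
  intro l1 l2 t1 t2 _ hpre
  unfold Spec_two_way_matching two_way_matching two_way_matching_alt
  rw [foldA_eq, countP_guard_eq t1 t2 _ hpre]
  simp only [countsD_eq, zero_add, List.length_zip, Nat.cast_min]
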